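-- pv_equiv track=rewrite | github.com/hjake123/advent-of-code | day17/day17b.py | has_run_4_zeros
-- ===== SOURCE A (Python) =====
-- def bits(number: int, start = 0x8000) -> iter:
--     '''
--     Iterator for the bits in a number.
--     '''
--     bit = start
--     while bit > 0:
--        yield number & bit
--        bit >>= 1
--
-- def has_run_4_zeros(row: int):
--     '''
--     Returns whether there is a run of 4 zeros anywhere in the row.
--     '''
--     r = 0
--     for b in bits(row, start=0b1000000):
--         if b == 0:
--             r += 1
--         else:
--             r = 0
--         if r == 4:
--             return True
--     return False
-- ===== SOURCE B (Python) =====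
-- def has_run_4_zeros(row: int):
--     '''
--     Returns whether there is a run of 4 zeros anywhere in the row.
--     '''
--     masked = row & 0x7f
--     s = format(masked, '07b')
--     return '0000' in s
-- ===== Notes on version B (the rewrite author's own statement) =====
-- stated objective: idiomatic
-- what changed: Replaces the per-bit iterator and run-length counter with masking to 7 bits, rendering a fixed-width binary string, and a substring test '0000' in s.
import Mathlib
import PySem

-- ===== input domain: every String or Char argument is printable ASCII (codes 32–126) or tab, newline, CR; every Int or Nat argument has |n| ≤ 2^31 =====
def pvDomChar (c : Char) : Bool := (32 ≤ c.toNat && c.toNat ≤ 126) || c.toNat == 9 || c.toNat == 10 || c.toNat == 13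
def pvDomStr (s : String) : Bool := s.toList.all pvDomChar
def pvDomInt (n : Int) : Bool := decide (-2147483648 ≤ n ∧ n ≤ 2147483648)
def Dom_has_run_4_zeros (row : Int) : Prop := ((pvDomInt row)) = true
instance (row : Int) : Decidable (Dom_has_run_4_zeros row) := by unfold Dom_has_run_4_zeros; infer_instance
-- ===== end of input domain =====

-- B replaces the per-bit loop with a run-length counter by a mask to 7 bits, a fixed-width
-- binary string rendering and a '0000' substring test (different algorithm, same O(1) cost).

-- ===== PORT A =====
-- Python's `bits` generator: yields number & bit for bit = start, start>>1, … while bit > 0.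
-- The fuel argument only makes the recursion structural (7 suffices for start = 0b1000000);
-- it never changes the computed list.
def pvBits (number : Int) (bit : Int) (fuel : Nat) : List Int :=
  match fuel with
  | 0 => []
  | fuel + 1 =>
      if bit > 0 then PySem.Int.band number bit :: pvBits number (bit >>> 1) fuel
      else []

-- the `for b in bits(...)` loop with counter r and early return True
def pvRunLoop (r : Int) (l : List Int) : Bool :=
  match l with
  | [] => false
  | b :: rest =>
      let r' := if b == 0 then r + 1 else (0 : Int)
      if r' == 4 then true else pvRunLoop r' rest

def has_run_4_zeros (row : Int) : Bool :=
  pvRunLoop 0 (pvBits row 0b1000000 7)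

-- ===== PORT B =====
-- format(masked, '07b'): masked = row & 0x7f lies in [0,127], so Python's '07b' is the plain
-- binary digits (PySem.Int.toBinChars) left-padded with '0' to width 7 — exact on this range.
def has_run_4_zeros_alt (row : Int) : Bool :=
  let masked := PySem.Int.band row 0x7f
  let d := PySem.Int.toBinChars masked
  let s := List.replicate (7 - d.length) '0' ++ d
  PySem.Chars.isIn ['0', '0', '0', '0'] s

-- ===== PRECONDITION & SPEC =====
def Spec_has_run_4_zeros (row : Int) (out : Bool) : Prop := out = has_run_4_zeros_alt row
instance (row : Int) (out : Bool) : Decidable (Spec_has_run_4_zeros row out) := by unfold Spec_has_run_4_zeros; infer_instance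

-- ===== CLAIM (what is proved, stated in full; the proofs are below) =====
def Claim_equal_has_run_4_zeros : Prop := ∀ (row : Int), Dom_has_run_4_zeros row → Spec_has_run_4_zeros row (has_run_4_zeros row)

-- ===== LEMMAS AND PROOFS =====

theorem pv_and127 (n : Nat) : n &&& 127 = n % 128 :=
  Nat.and_two_pow_sub_one_eq_mod n 7

-- masks reachable in the programs absorb into 127
theorem pv_absorb (n b : Nat) (hb : 127 &&& b = b) : n &&& b = (n % 128) &&& b := by
  rw [← pv_and127, Nat.and_assoc, hb]

theorem pv_band_nonneg (n b : Nat) (hb : 127 &&& b = b) :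
    PySem.Int.band (n : Int) (b : Int) = ((n % 128) &&& b : Nat) := by
  rw [PySem.Int.band_natCast, pv_absorb n b hb]

theorem pv_band_negSucc (m b : Nat) (hb : 127 &&& b = b) :
    PySem.Int.band (Int.negSucc m) (b : Int) = ((b - ((m % 128) &&& b) : Nat) : Int) := by
  have h1 : ¬ (0 : Int) ≤ Int.negSucc m := by omega
  have h2 : (0 : Int) ≤ (b : Int) := by positivity
  have h3 : (-(Int.negSucc m) - 1).toNat = m := by omega
  have h4 : ((b : Int)).toNat = b := by omega
  simp only [PySem.Int.band, if_neg h1, if_pos h2, h3, h4]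
  rw [Nat.and_comm b m, pv_absorb m b hb, Nat.and_comm]

-- both A-loop bands rewritten through a congruence on the masked bits
theorem pvA_congr (x y : Int)
    (h : ∀ b : Nat, 127 &&& b = b → PySem.Int.band x (b : Int) = PySem.Int.band y (b : Int)) :
    has_run_4_zeros x = has_run_4_zeros y := by
  have h64 : PySem.Int.band x (64 : Int) = PySem.Int.band y 64 := by exact_mod_cast h 64 (by decide)
  have h32 : PySem.Int.band x (32 : Int) = PySem.Int.band y 32 := by exact_mod_cast h 32 (by decide)
  have h16 : PySem.Int.band x (16 : Int) = PySem.Int.band y 16 := by exact_mod_cast h 16 (by decide)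
  have h8 : PySem.Int.band x (8 : Int) = PySem.Int.band y 8 := by exact_mod_cast h 8 (by decide)
  have h4 : PySem.Int.band x (4 : Int) = PySem.Int.band y 4 := by exact_mod_cast h 4 (by decide)
  have h2 : PySem.Int.band x (2 : Int) = PySem.Int.band y 2 := by exact_mod_cast h 2 (by decide)
  have h1 : PySem.Int.band x (1 : Int) = PySem.Int.band y 1 := by exact_mod_cast h 1 (by decide)
  have s1 : (64 : Int) >>> 1 = 32 := by decide
  have s2 : (32 : Int) >>> 1 = 16 := by decide
  have s3 : (16 : Int) >>> 1 = 8 := by decide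
  have s4 : (8 : Int) >>> 1 = 4 := by decide
  have s5 : (4 : Int) >>> 1 = 2 := by decide
  have s6 : (2 : Int) >>> 1 = 1 := by decide
  simp only [has_run_4_zeros, pvBits]
  norm_num [s1, s2, s3, s4, s5, s6, h64, h32, h16, h8, h4, h2, h1]

-- A on a nonnegative input depends only on the input mod 128
theorem pvA_nonneg (n : Nat) :
    has_run_4_zeros (n : Int) = has_run_4_zeros ((n % 128 : Nat) : Int) := by
  apply pvA_congr
  intro b hb
  rw [pv_band_nonneg _ _ hb, pv_band_nonneg _ _ hb, Nat.mod_mod_of_dvd n (dvd_refl 128)]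

theorem pvA_negSucc (m : Nat) :
    has_run_4_zeros (Int.negSucc m) = has_run_4_zeros (Int.negSucc (m % 128)) := by
  apply pvA_congr
  intro b hb
  rw [pv_band_negSucc _ _ hb, pv_band_negSucc _ _ hb, Nat.mod_mod_of_dvd m (dvd_refl 128)]

-- B depends on the input only through row & 0x7f
theorem pvB_mask (row row' : Int)
    (h : PySem.Int.band row 0x7f = PySem.Int.band row' 0x7f) :
    has_run_4_zeros_alt row = has_run_4_zeros_alt row' := by
  simp only [has_run_4_zeros_alt, h]

theorem pvB_nonneg (n : Nat) :
    has_run_4_zeros_alt (n : Int) = has_run_4_zeros_alt ((n % 128 : Nat) : Int) := by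
  apply pvB_mask
  have e1 : PySem.Int.band (n : Int) (127 : Int) = ((n % 128 &&& 127 : Nat) : Int) := by
    exact_mod_cast pv_band_nonneg n 127 (by decide)
  have e2 : PySem.Int.band ((n % 128 : Nat) : Int) (127 : Int)
      = ((n % 128 % 128 &&& 127 : Nat) : Int) := by
    exact_mod_cast pv_band_nonneg (n % 128) 127 (by decide)
  rw [show (0x7f : Int) = 127 from rfl, e1, e2, Nat.mod_mod_of_dvd n (dvd_refl 128)]

theorem pvB_negSucc (m : Nat) :
    has_run_4_zeros_alt (Int.negSucc m) = has_run_4_zeros_alt (Int.negSucc (m % 128)) := by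
  apply pvB_mask
  have e1 : PySem.Int.band (Int.negSucc m) (127 : Int)
      = ((127 - (m % 128 &&& 127) : Nat) : Int) := by
    exact_mod_cast pv_band_negSucc m 127 (by decide)
  have e2 : PySem.Int.band (Int.negSucc (m % 128)) (127 : Int)
      = ((127 - (m % 128 % 128 &&& 127) : Nat) : Int) := by
    exact_mod_cast pv_band_negSucc (m % 128) 127 (by decide)
  rw [show (0x7f : Int) = 127 from rfl, e1, e2, Nat.mod_mod_of_dvd m (dvd_refl 128)]

theorem pv_all_nonneg : ∀ v : Nat, v < 128 →
    has_run_4_zeros (v : Int) = has_run_4_zeros_alt (v : Int) := by decide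

theorem pv_all_negSucc : ∀ v : Nat, v < 128 →
    has_run_4_zeros (Int.negSucc v) = has_run_4_zeros_alt (Int.negSucc v) := by decide

-- ===== VERDICT (by name: the statement is the Claim_ definition above) =====
theorem has_run_4_zeros_spec : Claim_equal_has_run_4_zeros := by
  intro row _
  unfold Spec_has_run_4_zeros
  cases row with
  | ofNat n =>
      show has_run_4_zeros (n : Int) = has_run_4_zeros_alt (n : Int)
      rw [pvA_nonneg, pvB_nonneg]
      exact pv_all_nonneg _ (Nat.mod_lt _ (by norm_num))
  | negSucc m =>
      rw [pvA_negSucc, pvB_negSucc]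
      exact pv_all_negSucc _ (Nat.mod_lt _ (by norm_num))
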